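-- pv_equiv track=rewrite | github.com/kilobits1/aether-core | app.py | _trust_zone_allowed
-- ===== SOURCE A (Python) =====
-- from typing import Any, Dict, List, Tuple, Optional
--
-- TRUST_ZONES = {"UI", "CHAT", "INTERNAL", "ORCH"}
--
-- TRUST_ZONE_POLICIES = {
--     "UI": {
--         "task_types": {"read_only", "analysis", "write_state", "io_export"},
--         "special": {"reload_plugins", "snapshot_restore", "snapshot_import", "snapshot_export", "snapshot_create"},
--     },
--     "CHAT": {
--         "task_types": {"read_only", "analysis"},
--         "special": set(),
--     },
--     "INTERNAL": {
--         "task_types": {"read_only"},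
--         "special": set(),
--     },
--     "ORCH": {
--         "task_types": {"read_only", "analysis", "write_state", "io_export"},
--         "special": set(),
--     },
-- }
--
-- def _detect_special_commands(command: str) -> List[str]:
--     cmd = (command or "").lower()
--     specials = set()
--     if "reload" in cmd and "plugin" in cmd:
--         specials.add("reload_plugins")
--     if "snapshot restore" in cmd or ("snapshot" in cmd and "restore" in cmd):
--         specials.add("snapshot_restore")
--     if "snapshot import" in cmd or ("snapshot" in cmd and "import" in cmd):
--         specials.add("snapshot_import")
--     if "snapshot export" in cmd or ("snapshot" in cmd and "export" in cmd):
--         specials.add("snapshot_export")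
--     if "snapshot create" in cmd or ("snapshot" in cmd and "create" in cmd):
--         specials.add("snapshot_create")
--     if "replica apply" in cmd:
--         specials.add("replica_apply")
--     if "replica import" in cmd:
--         specials.add("replica_import")
--     return sorted(specials)
--
-- def _trust_zone_allowed(zone: str, task_type: str, command: str) -> Tuple[bool, str, List[str]]:
--     if zone not in TRUST_ZONES:
--         return False, "invalid_zone", []
--     policy = TRUST_ZONE_POLICIES.get(zone) or {}
--     allowed_types = policy.get("task_types") or set()
--     allowed_special = policy.get("special") or set()
--     specials = _detect_special_commands(command)
--
--     if task_type == "system":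
--         return False, "system_blocked", specials
--     if task_type not in allowed_types:
--         return False, "task_type_blocked", specials
--     if specials:
--         for special in specials:
--             if special not in allowed_special:
--                 return False, f"special_blocked:{special}", specials
--     return True, "", specials
-- ===== SOURCE B (Python) =====
-- TRUST_ZONES = {"UI", "CHAT", "INTERNAL", "ORCH"}
--
-- # special-command rules, in sorted name order: name -> substrings that must all occur
-- _SPECIAL_RULES = [
--     ("reload_plugins", ("reload", "plugin")),
--     ("replica_apply", ("replica apply",)),
--     ("replica_import", ("replica import",)),
--     ("snapshot_create", ("snapshot", "create")),
--     ("snapshot_export", ("snapshot", "export")),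
--     ("snapshot_import", ("snapshot", "import")),
--     ("snapshot_restore", ("snapshot", "restore")),
-- ]
--
-- _POLICIES = {
--     "UI": ({"read_only", "analysis", "write_state", "io_export"},
--            {"reload_plugins", "snapshot_restore", "snapshot_import",
--             "snapshot_export", "snapshot_create"}),
--     "CHAT": ({"read_only", "analysis"}, set()),
--     "INTERNAL": ({"read_only"}, set()),
--     "ORCH": ({"read_only", "analysis", "write_state", "io_export"}, set()),
-- }
--
-- def _trust_zone_allowed(zone, task_type, command):
--     if zone not in TRUST_ZONES:
--         return False, "invalid_zone", []
--     allowed_types, allowed_special = _POLICIES[zone]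
--     cmd = command.lower()
--     specials = [name for name, subs in _SPECIAL_RULES
--                 if all(s in cmd for s in subs)]
--     if task_type == "system":
--         return False, "system_blocked", specials
--     if task_type not in allowed_types:
--         return False, "task_type_blocked", specials
--     blocked = next((s for s in specials if s not in allowed_special), None)
--     if blocked is not None:
--         return False, "special_blocked:" + blocked, specials
--     return True, "", specials
-- ===== Notes on version B (the rewrite author's own statement) =====
-- stated objective: idiomatic
-- what changed: The hand-written chain of per-special if/add clauses (with redundant literal-phrase disjuncts) is replaced by a data-driven rules table emitted in sorted order by one comprehension, and the blocking loop by a single next(); the policy table becomes flat tuples indexed directly.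
import Mathlib
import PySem

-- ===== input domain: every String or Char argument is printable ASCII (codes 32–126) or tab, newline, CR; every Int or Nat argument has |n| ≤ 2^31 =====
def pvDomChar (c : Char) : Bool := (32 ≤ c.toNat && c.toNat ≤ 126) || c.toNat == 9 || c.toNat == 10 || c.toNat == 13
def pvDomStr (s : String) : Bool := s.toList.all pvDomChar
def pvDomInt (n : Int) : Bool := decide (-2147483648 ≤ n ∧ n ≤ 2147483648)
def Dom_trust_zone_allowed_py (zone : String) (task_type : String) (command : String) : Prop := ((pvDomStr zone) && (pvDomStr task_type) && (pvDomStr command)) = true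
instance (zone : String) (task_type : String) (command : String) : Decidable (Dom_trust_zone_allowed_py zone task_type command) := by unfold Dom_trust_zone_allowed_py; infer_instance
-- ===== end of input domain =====

-- B replaces A's hand-written chain of per-special if/add clauses (with redundant literal-phrase
-- disjuncts) by a data-driven rules table scanned in sorted order, and the blocking loop by a
-- first-match scan; objective: idiomatic. Same return value on every input.

-- ===== PORT A =====
def pvTRUST_ZONES : PySem.Set String :=
  PySem.Set.ofList ["UI", "CHAT", "INTERNAL", "ORCH"]

def pvTRUST_ZONE_POLICIES : PySem.Dict String (PySem.Dict String (PySem.Set String)) :=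
  PySem.Dict.ofList
  [("UI", PySem.Dict.ofList
      [("task_types", PySem.Set.ofList ["read_only", "analysis", "write_state", "io_export"]),
       ("special", PySem.Set.ofList ["reload_plugins", "snapshot_restore", "snapshot_import", "snapshot_export", "snapshot_create"])]),
   ("CHAT", PySem.Dict.ofList [("task_types", PySem.Set.ofList ["read_only", "analysis"]), ("special", PySem.Set.empty)]),
   ("INTERNAL", PySem.Dict.ofList [("task_types", PySem.Set.ofList ["read_only"]), ("special", PySem.Set.empty)]),
   ("ORCH", PySem.Dict.ofList [("task_types", PySem.Set.ofList ["read_only", "analysis", "write_state", "io_export"]), ("special", PySem.Set.empty)])]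

-- 'd or {}' / 's or set()' on an Option lookup: none or an empty value gives the empty one
def pvOrDict (o : Option (PySem.Dict String (PySem.Set String))) : PySem.Dict String (PySem.Set String) :=
  match o with
  | none => PySem.Dict.empty
  | some d => if d = PySem.Dict.empty then PySem.Dict.empty else d

def pvOrSet (o : Option (PySem.Set String)) : PySem.Set String :=
  match o with
  | none => PySem.Set.empty
  | some s => if s = PySem.Set.empty then PySem.Set.empty else s

def pvDetectSpecial (command : String) : List String :=
  -- cmd = (command or "").lower()
  let cmd := PySem.Str.lower (if command = "" then "" else command)
  let specials : PySem.Set String := PySem.Set.empty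
  let specials := if PySem.Str.isIn "reload" cmd && PySem.Str.isIn "plugin" cmd then PySem.Set.add specials "reload_plugins" else specials
  let specials := if PySem.Str.isIn "snapshot restore" cmd || (PySem.Str.isIn "snapshot" cmd && PySem.Str.isIn "restore" cmd) then PySem.Set.add specials "snapshot_restore" else specials
  let specials := if PySem.Str.isIn "snapshot import" cmd || (PySem.Str.isIn "snapshot" cmd && PySem.Str.isIn "import" cmd) then PySem.Set.add specials "snapshot_import" else specials
  let specials := if PySem.Str.isIn "snapshot export" cmd || (PySem.Str.isIn "snapshot" cmd && PySem.Str.isIn "export" cmd) then PySem.Set.add specials "snapshot_export" else specials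
  let specials := if PySem.Str.isIn "snapshot create" cmd || (PySem.Str.isIn "snapshot" cmd && PySem.Str.isIn "create" cmd) then PySem.Set.add specials "snapshot_create" else specials
  let specials := if PySem.Str.isIn "replica apply" cmd then PySem.Set.add specials "replica_apply" else specials
  let specials := if PySem.Str.isIn "replica import" cmd then PySem.Set.add specials "replica_import" else specials
  PySem.List.sorted specials (fun x => x) false

-- 'for special in specials: if special not in allowed_special: return …' — first blocked special
def pvLoopBlocked (specials : List String) (allowed : PySem.Set String) : Option String :=
  match specials with
  | [] => none
  | s :: rest => if !(PySem.Set.contains allowed s) then some s else pvLoopBlocked rest allowed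

def trust_zone_allowed_py (zone : String) (task_type : String) (command : String) : Bool × String × List String :=
  if !(PySem.Set.contains pvTRUST_ZONES zone) then (false, "invalid_zone", [])
  else
    let policy := pvOrDict (PySem.Dict.get? pvTRUST_ZONE_POLICIES zone)
    let allowed_types := pvOrSet (PySem.Dict.get? policy "task_types")
    let allowed_special := pvOrSet (PySem.Dict.get? policy "special")
    let specials := pvDetectSpecial command
    if task_type = "system" then (false, "system_blocked", specials)
    else if !(PySem.Set.contains allowed_types task_type) then (false, "task_type_blocked", specials)
    else if specials = [] then (true, "", specials)
    else
      match pvLoopBlocked specials allowed_special with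
      | some s => (false, "special_blocked:" ++ s, specials)
      | none => (true, "", specials)

-- ===== PORT B =====
def pvSpecialRules : List (String × List String) :=
  [("reload_plugins", ["reload", "plugin"]),
   ("replica_apply", ["replica apply"]),
   ("replica_import", ["replica import"]),
   ("snapshot_create", ["snapshot", "create"]),
   ("snapshot_export", ["snapshot", "export"]),
   ("snapshot_import", ["snapshot", "import"]),
   ("snapshot_restore", ["snapshot", "restore"])]

def pvPoliciesB : PySem.Dict String (PySem.Set String × PySem.Set String) :=
  PySem.Dict.ofList
  [("UI", (PySem.Set.ofList ["read_only", "analysis", "write_state", "io_export"],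
           PySem.Set.ofList ["reload_plugins", "snapshot_restore", "snapshot_import", "snapshot_export", "snapshot_create"])),
   ("CHAT", (PySem.Set.ofList ["read_only", "analysis"], PySem.Set.empty)),
   ("INTERNAL", (PySem.Set.ofList ["read_only"], PySem.Set.empty)),
   ("ORCH", (PySem.Set.ofList ["read_only", "analysis", "write_state", "io_export"], PySem.Set.empty))]

def trust_zone_allowed_py_alt (zone : String) (task_type : String) (command : String) : Bool × String × List String :=
  if !(PySem.Set.contains pvTRUST_ZONES zone) then (false, "invalid_zone", [])
  else
    -- _POLICIES[zone]: the default is unreachable (every member of TRUST_ZONES is a key)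
    let p := (PySem.Dict.get? pvPoliciesB zone).getD (PySem.Set.empty, PySem.Set.empty)
    let allowed_types := p.1
    let allowed_special := p.2
    let cmd := PySem.Str.lower command
    let specials := pvSpecialRules.filterMap
      (fun r => if r.2.all (fun s => PySem.Str.isIn s cmd) then some r.1 else none)
    if task_type = "system" then (false, "system_blocked", specials)
    else if !(PySem.Set.contains allowed_types task_type) then (false, "task_type_blocked", specials)
    else
      match specials.find? (fun s => !(PySem.Set.contains allowed_special s)) with
      | some s => (false, "special_blocked:" ++ s, specials)
      | none => (true, "", specials)

-- ===== PRECONDITION & SPEC =====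
def Spec_trust_zone_allowed_py (zone : String) (task_type : String) (command : String) (out : Bool × String × List String) : Prop := out = trust_zone_allowed_py_alt zone task_type command
instance (zone : String) (task_type : String) (command : String) (out : Bool × String × List String) : Decidable (Spec_trust_zone_allowed_py zone task_type command out) := by unfold Spec_trust_zone_allowed_py; infer_instance

-- ===== CLAIM (what is proved, stated in full; the proofs are below) =====
def Claim_equal_trust_zone_allowed_py : Prop := ∀ (zone : String) (task_type : String) (command : String), Dom_trust_zone_allowed_py zone task_type command → Spec_trust_zone_allowed_py zone task_type command (trust_zone_allowed_py zone task_type command)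

-- ===== LEMMAS AND PROOFS =====

-- A's set-building guard chain, abstracted over the seven (deduplicated) guard booleans, in A's add order
def pvChainA (b1 b2 b3 b4 b5 b6 b7 : Bool) : PySem.Set String :=
  let s : PySem.Set String := PySem.Set.empty
  let s := if b1 then PySem.Set.add s "reload_plugins" else s
  let s := if b7 then PySem.Set.add s "snapshot_restore" else s
  let s := if b6 then PySem.Set.add s "snapshot_import" else s
  let s := if b5 then PySem.Set.add s "snapshot_export" else s
  let s := if b4 then PySem.Set.add s "snapshot_create" else s
  let s := if b2 then PySem.Set.add s "replica_apply" else s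
  if b3 then PySem.Set.add s "replica_import" else s

-- B's filterMap result, abstracted over the same booleans, in sorted name order
def pvChainB (b1 b2 b3 b4 b5 b6 b7 : Bool) : List String :=
  let t : List String := if b7 then ["snapshot_restore"] else []
  let t := if b6 then "snapshot_import" :: t else t
  let t := if b5 then "snapshot_export" :: t else t
  let t := if b4 then "snapshot_create" :: t else t
  let t := if b3 then "replica_import" :: t else t
  let t := if b2 then "replica_apply" :: t else t
  if b1 then "reload_plugins" :: t else t

-- the seven special names in sorted order are pairwise strictly increasing
theorem pv_master_pairwise :
    (["reload_plugins", "replica_apply", "replica_import", "snapshot_create",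
      "snapshot_export", "snapshot_import", "snapshot_restore"] : List String).Pairwise (· < ·) :=
  List.Pairwise.imp (fun h => String.lt_iff_toList_lt.mpr h) (by decide)

theorem pv_core : ∀ (b1 b2 b3 b4 b5 b6 b7 : Bool),
    PySem.List.sorted (pvChainA b1 b2 b3 b4 b5 b6 b7) (fun x => x) false
      = pvChainB b1 b2 b3 b4 b5 b6 b7 := by
  intro b1 b2 b3 b4 b5 b6 b7
  cases b1 <;> cases b2 <;> cases b3 <;> cases b4 <;> cases b5 <;> cases b6 <;> cases b7 <;>
    refine PySem.List.sorted_eq_of_perm_of_pairwise_lt _ _ _ ?_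
      (List.Pairwise.sublist ?_ pv_master_pairwise) <;> decide

theorem pv_isIn_trans (sub phrase : String) (cmd : String)
    (hsub : sub.toList <:+: phrase.toList)
    (h : PySem.Str.isIn phrase cmd = true) : PySem.Str.isIn sub cmd = true := by
  rw [PySem.Str.isIn_iff_infix] at h ⊢
  exact hsub.trans h

-- '"snapshot X" in cmd or ("snapshot" in cmd and "X" in cmd)' collapses to the conjunction
theorem pv_phrase_absorb (sub1 sub2 phrase cmd : String)
    (h1 : sub1.toList <:+: phrase.toList) (h2 : sub2.toList <:+: phrase.toList) :
    (PySem.Str.isIn phrase cmd || (PySem.Str.isIn sub1 cmd && PySem.Str.isIn sub2 cmd))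
      = (PySem.Str.isIn sub1 cmd && PySem.Str.isIn sub2 cmd) := by
  cases hp : PySem.Str.isIn phrase cmd
  · simp
  · rw [pv_isIn_trans sub1 phrase cmd h1 hp, pv_isIn_trans sub2 phrase cmd h2 hp]
    rfl

theorem pv_filterB (cmd : String) :
    pvSpecialRules.filterMap (fun r => if r.2.all (fun s => PySem.Str.isIn s cmd) then some r.1 else none)
      = pvChainB (PySem.Str.isIn "reload" cmd && PySem.Str.isIn "plugin" cmd)
          (PySem.Str.isIn "replica apply" cmd) (PySem.Str.isIn "replica import" cmd)
          (PySem.Str.isIn "snapshot" cmd && PySem.Str.isIn "create" cmd)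
          (PySem.Str.isIn "snapshot" cmd && PySem.Str.isIn "export" cmd)
          (PySem.Str.isIn "snapshot" cmd && PySem.Str.isIn "import" cmd)
          (PySem.Str.isIn "snapshot" cmd && PySem.Str.isIn "restore" cmd) := by
  simp only [pvSpecialRules, pvChainB, List.filterMap_cons, List.filterMap_nil,
    List.all_cons, List.all_nil, Bool.and_true]
  cases (PySem.Str.isIn "reload" cmd && PySem.Str.isIn "plugin" cmd) <;>
    cases (PySem.Str.isIn "replica apply" cmd) <;>
    cases (PySem.Str.isIn "replica import" cmd) <;>
    cases (PySem.Str.isIn "snapshot" cmd && PySem.Str.isIn "create" cmd) <;>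
    cases (PySem.Str.isIn "snapshot" cmd && PySem.Str.isIn "export" cmd) <;>
    cases (PySem.Str.isIn "snapshot" cmd && PySem.Str.isIn "import" cmd) <;>
    cases (PySem.Str.isIn "snapshot" cmd && PySem.Str.isIn "restore" cmd) <;> rfl

theorem pv_detect_eq (command : String) :
    pvDetectSpecial command
      = pvSpecialRules.filterMap
          (fun r => if r.2.all (fun s => PySem.Str.isIn s (PySem.Str.lower command)) then some r.1 else none) := by
  have hc : (if command = "" then "" else command) = command := by
    split_ifs with h
    · exact h.symm
    · rfl
  rw [pv_filterB]
  simp only [pvDetectSpecial]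
  rw [hc,
    pv_phrase_absorb "snapshot" "restore" "snapshot restore" (PySem.Str.lower command) (by decide) (by decide),
    pv_phrase_absorb "snapshot" "import" "snapshot import" (PySem.Str.lower command) (by decide) (by decide),
    pv_phrase_absorb "snapshot" "export" "snapshot export" (PySem.Str.lower command) (by decide) (by decide),
    pv_phrase_absorb "snapshot" "create" "snapshot create" (PySem.Str.lower command) (by decide) (by decide)]
  exact pv_core _ _ _ _ _ _ _

theorem pv_loop_eq (l : List String) (al : PySem.Set String) :
    pvLoopBlocked l al = l.find? (fun s => !(PySem.Set.contains al s)) := by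
  induction l with
  | nil => rfl
  | cons s rest ih =>
    simp only [pvLoopBlocked, List.find?]
    cases PySem.Set.contains al s <;> simp [ih]

-- the decision tail after the policy lookups agree (A's redundant 'if specials:' guard removed)
theorem pv_tail (tt : String) (sp : List String) (aty asp : PySem.Set String) :
    (if tt = "system" then ((false, "system_blocked", sp) : Bool × String × List String)
     else if !(PySem.Set.contains aty tt) then (false, "task_type_blocked", sp)
     else if sp = [] then (true, "", sp)
     else
       match pvLoopBlocked sp asp with
       | some s => (false, "special_blocked:" ++ s, sp)
       | none => (true, "", sp))
    = (if tt = "system" then (false, "system_blocked", sp)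
       else if !(PySem.Set.contains aty tt) then (false, "task_type_blocked", sp)
       else
         match sp.find? (fun s => !(PySem.Set.contains asp s)) with
         | some s => (false, "special_blocked:" ++ s, sp)
         | none => (true, "", sp)) := by
  rw [pv_loop_eq]
  split_ifs with h1 h2 h3 <;> try rfl
  subst h3
  rfl

-- ===== VERDICT (by name: the statement is the Claim_ definition above) =====
theorem trust_zone_allowed_py_spec : Claim_equal_trust_zone_allowed_py := by
  intro zone task_type command _
  unfold Spec_trust_zone_allowed_py trust_zone_allowed_py trust_zone_allowed_py_alt
  cases hz : PySem.Set.contains pvTRUST_ZONES zone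
  · simp
  · have hmem : zone ∈ (["UI", "CHAT", "INTERNAL", "ORCH"] : List String) := by
      have h' := (PySem.Set.contains_iff pvTRUST_ZONES zone).mp hz
      simpa [pvTRUST_ZONES, PySem.Set.mem_ofList] using h'
    simp only [Bool.not_true, Bool.false_eq_true, if_false, pv_detect_eq]
    have hmem' : zone = "UI" ∨ zone = "CHAT" ∨ zone = "INTERNAL" ∨ zone = "ORCH" := by
      simpa using hmem
    rcases hmem' with h | h | h | h <;> subst h
    · rw [show pvOrSet ((pvOrDict (pvTRUST_ZONE_POLICIES.get? "UI")).get? "task_types")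
            = ((pvPoliciesB.get? "UI").getD (PySem.Set.empty, PySem.Set.empty)).1 from by decide,
          show pvOrSet ((pvOrDict (pvTRUST_ZONE_POLICIES.get? "UI")).get? "special")
            = ((pvPoliciesB.get? "UI").getD (PySem.Set.empty, PySem.Set.empty)).2 from by decide]
      exact pv_tail _ _ _ _
    · rw [show pvOrSet ((pvOrDict (pvTRUST_ZONE_POLICIES.get? "CHAT")).get? "task_types")
            = ((pvPoliciesB.get? "CHAT").getD (PySem.Set.empty, PySem.Set.empty)).1 from by decide,
          show pvOrSet ((pvOrDict (pvTRUST_ZONE_POLICIES.get? "CHAT")).get? "special")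
            = ((pvPoliciesB.get? "CHAT").getD (PySem.Set.empty, PySem.Set.empty)).2 from by decide]
      exact pv_tail _ _ _ _
    · rw [show pvOrSet ((pvOrDict (pvTRUST_ZONE_POLICIES.get? "INTERNAL")).get? "task_types")
            = ((pvPoliciesB.get? "INTERNAL").getD (PySem.Set.empty, PySem.Set.empty)).1 from by decide,
          show pvOrSet ((pvOrDict (pvTRUST_ZONE_POLICIES.get? "INTERNAL")).get? "special")
            = ((pvPoliciesB.get? "INTERNAL").getD (PySem.Set.empty, PySem.Set.empty)).2 from by decide]
      exact pv_tail _ _ _ _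
    · rw [show pvOrSet ((pvOrDict (pvTRUST_ZONE_POLICIES.get? "ORCH")).get? "task_types")
            = ((pvPoliciesB.get? "ORCH").getD (PySem.Set.empty, PySem.Set.empty)).1 from by decide,
          show pvOrSet ((pvOrDict (pvTRUST_ZONE_POLICIES.get? "ORCH")).get? "special")
            = ((pvPoliciesB.get? "ORCH").getD (PySem.Set.empty, PySem.Set.empty)).2 from by decide]
      exact pv_tail _ _ _ _
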